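-- pv_equiv track=rewrite | github.com/shankarkrishnamurthy/problem-solving | maximize-number-of-subsequences-in-a-string.py | maximumSubsequenceCount
-- ===== SOURCE A (Python) =====
-- def maximumSubsequenceCount(t, p):
--     a,b, res,ch = p[0],p[1], 0,{p[0]:[], p[1]:[]}
--     for i in range(len(t)):
--         if t[i] == a: ch[a].append(i)
--         elif t[i] == b: ch[b].append(i)
--         else: pass
--     if a == b:
--         if len(ch[a]) == 0: return 0
--         res = len(ch[a]) * (len(ch[a]) - 1)//2
--         return res + len(ch[a])
--     for i in ch[a]:
--         j = bisect(ch[b], i)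
--         res += len(ch[b]) - j
--     return res + max(len(ch[a]), len(ch[b]))
-- ===== SOURCE B (Python) =====
-- def maximumSubsequenceCount(t, p):
--     a, b = p[0], p[1]
--     ca = cb = res = 0
--     for c in t:
--         if c == b:
--             res += ca
--             cb += 1
--         if c == a:
--             ca += 1
--     return res + max(ca, cb)
-- ===== Notes on version B (the rewrite author's own statement) =====
-- stated objective: simpler
-- what changed: A builds index lists for both pattern characters, has a separate closed-form branch for p[0]==p[1], and (as written) runs a bisect per occurrence of p[0]; B is one short pass over t keeping running counters (a-count, b-count, pair count) with no index lists, no bisect and no special case.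
-- crash fix: A's module never imports bisect, so A raises NameError whenever p[0] != p[1] and p[0] occurs in t (and IndexError when len(p) < 2); B returns the subsequence count there. — e.g. on maximumSubsequenceCount("ab", "ab"): A raises NameError, B returns 2
import Mathlib
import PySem

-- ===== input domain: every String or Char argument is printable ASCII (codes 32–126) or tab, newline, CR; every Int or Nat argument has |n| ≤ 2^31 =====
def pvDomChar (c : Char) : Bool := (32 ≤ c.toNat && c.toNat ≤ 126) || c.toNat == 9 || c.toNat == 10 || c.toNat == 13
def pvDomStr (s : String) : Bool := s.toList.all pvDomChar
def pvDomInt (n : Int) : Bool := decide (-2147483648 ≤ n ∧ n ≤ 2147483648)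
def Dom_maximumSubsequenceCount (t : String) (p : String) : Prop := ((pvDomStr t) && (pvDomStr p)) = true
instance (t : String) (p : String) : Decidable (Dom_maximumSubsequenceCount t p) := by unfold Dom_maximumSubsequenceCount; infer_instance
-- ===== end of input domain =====

-- B replaces A's index-list building, bisect calls and p[0]==p[1] special case with one
-- short pass over t keeping running counters (a-count, b-count, pair count).

-- ===== PORT A =====
-- the index-collecting loop 'for i in range(len(t)): if t[i]==a: ch[a].append(i) elif t[i]==b: ch[b].append(i)'
def pvCollect (a b : Char) (cs : List Char) (k : Int) (s : List Int × List Int) :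
    List Int × List Int :=
  match cs with
  | [] => s
  | c :: cs =>
    pvCollect a b cs (k + 1)
      (if c == a then (s.1 ++ [k], s.2)
       else if c == b then (s.1, s.2 ++ [k]) else s)

-- bisect.bisect (= bisect_right) on a SORTED list returns the number of elements ≤ x;
-- ch[b] is built in increasing index order, so this is exact here.
def pvBisect (xs : List Int) (x : Int) : Int :=
  ((xs.countP (fun y => decide (y ≤ x)) : Nat) : Int)

def maximumSubsequenceCount (t : String) (p : String) : Int :=
  match p.toList with
  | a :: b :: _ =>
    let s := pvCollect a b t.toList 0 ([], [])
    if a == b then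
      if s.1.length = 0 then 0
      else PySem.Int.floordiv ((s.1.length : Int) * ((s.1.length : Int) - 1)) 2
           + (s.1.length : Int)
    else
      let res := s.1.foldl (fun r i => r + ((s.2.length : Int) - pvBisect s.2 i)) 0
      res + max (s.1.length : Int) (s.2.length : Int)
  | _ => 0  -- p[0]/p[1] raise IndexError in Python; excluded by Pre_

-- ===== PORT B =====
def maximumSubsequenceCount_alt (t : String) (p : String) : Int :=
  match PySem.Str.pyGet? p 0, PySem.Str.pyGet? p 1 with
  | some a, some b =>
    let s := t.toList.foldl
      (fun (s : Int × Int × Int) c =>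
        let s := if c == b then (s.1, s.2.1 + 1, s.2.2 + s.1) else s
        if c == a then (s.1 + 1, s.2) else s)
      (0, 0, 0)
    s.2.2 + max s.1 s.2.1
  | _, _ => 0  -- p[0]/p[1] raise IndexError in Python; excluded by Pre_

-- ===== PRECONDITION & SPEC =====
-- Python A raises IndexError if p has fewer than two characters, and (the module never
-- imports bisect) NameError whenever p[0] ≠ p[1] and p[0] occurs in t, i.e. whenever the
-- 'for i in ch[a]' loop body runs; Pre_ is exactly the inputs on which A returns.
def Pre_maximumSubsequenceCount (t : String) (p : String) : Prop :=
  2 ≤ p.toList.length ∧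
    (p.toList[0]? = p.toList[1]? ∨ ∀ c ∈ p.toList.take 1, c ∉ t.toList)
instance (t : String) (p : String) : Decidable (Pre_maximumSubsequenceCount t p) := by
  unfold Pre_maximumSubsequenceCount; infer_instance

def pvWitness_maximumSubsequenceCount : String × String := ("aabaa", "aa")

-- A raises NameError ('bisect' is never imported) whenever p[0] ≠ p[1] and p[0] occurs in t;
-- B returns the subsequence count there.
def Raises_maximumSubsequenceCount (t : String) (p : String) : Prop :=
  2 ≤ p.toList.length ∧ p.toList[0]? ≠ p.toList[1]? ∧ ∀ c ∈ p.toList.take 1, c ∈ t.toList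
instance (t : String) (p : String) : Decidable (Raises_maximumSubsequenceCount t p) := by
  unfold Raises_maximumSubsequenceCount; infer_instance

def pvRaiseWitness_maximumSubsequenceCount : String × String := ("ab", "ab")
def pvRaiseWitnessOut_maximumSubsequenceCount : Int := 2

def Spec_maximumSubsequenceCount (t : String) (p : String) (out : Int) : Prop := out = maximumSubsequenceCount_alt t p
instance (t : String) (p : String) (out : Int) : Decidable (Spec_maximumSubsequenceCount t p out) := by unfold Spec_maximumSubsequenceCount; infer_instance

-- ===== CLAIM (what is proved, stated in full; the proofs are below) =====
def Claim_equal_maximumSubsequenceCount : Prop := ∀ (t : String) (p : String), Dom_maximumSubsequenceCount t p → Pre_maximumSubsequenceCount t p → Spec_maximumSubsequenceCount t p (maximumSubsequenceCount t p)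

def Claim_raises_maximumSubsequenceCount : Prop := (∀ (t : String) (p : String), Dom_maximumSubsequenceCount t p → Raises_maximumSubsequenceCount t p → ¬ Pre_maximumSubsequenceCount t p) ∧ (Dom_maximumSubsequenceCount (pvRaiseWitness_maximumSubsequenceCount.1) (pvRaiseWitness_maximumSubsequenceCount.2) ∧ Raises_maximumSubsequenceCount (pvRaiseWitness_maximumSubsequenceCount.1) (pvRaiseWitness_maximumSubsequenceCount.2) ∧ maximumSubsequenceCount_alt (pvRaiseWitness_maximumSubsequenceCount.1) (pvRaiseWitness_maximumSubsequenceCount.2) = pvRaiseWitnessOut_maximumSubsequenceCount)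

-- ===== LEMMAS AND PROOFS =====

-- pair count: number of positions i < j with cs[i] = a and cs[j] = b
def pvP (a b : Char) : List Char → Int
  | [] => 0
  | c :: cs => (if c == a then (cs.count b : Int) else 0) + pvP a b cs

def pvPairs (la lb : List Int) : Int :=
  match la with
  | [] => 0
  | i :: la => ((lb.countP (fun j => decide (i < j)) : Nat) : Int) + pvPairs la lb

theorem pvPairs_append_left (la lb : List Int) (k : Int) :
    pvPairs (la ++ [k]) lb
      = pvPairs la lb + ((lb.countP (fun j => decide (k < j)) : Nat) : Int) := by
  induction la with
  | nil => simp [pvPairs]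
  | cons i la ih => simp [pvPairs, ih]; ring

theorem pvPairs_append_right (la lb : List Int) (k : Int) :
    pvPairs la (lb ++ [k])
      = pvPairs la lb + ((la.countP (fun i => decide (i < k)) : Nat) : Int) := by
  induction la with
  | nil => simp [pvPairs]
  | cons i la ih =>
    simp [pvPairs, ih, List.countP_append, List.countP_cons]
    by_cases h : i < k <;> simp [h] <;> omega

theorem pvCollect_fst_length (a b : Char) (cs : List Char) (k : Int)
    (s : List Int × List Int) :
    (pvCollect a b cs k s).1.length = s.1.length + cs.count a := by
  induction cs generalizing k s with
  | nil => simp [pvCollect]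
  | cons c cs ih =>
    simp only [pvCollect, List.count_cons]
    by_cases h1 : c == a
    · simp [h1, ih]; omega
    · by_cases h2 : c == b <;> simp [h1, h2, ih]

theorem pvCollect_snd_length (a b : Char) (hab : (a == b) = false) (cs : List Char)
    (k : Int) (s : List Int × List Int) :
    (pvCollect a b cs k s).2.length = s.2.length + cs.count b := by
  induction cs generalizing k s with
  | nil => simp [pvCollect]
  | cons c cs ih =>
    simp only [pvCollect, List.count_cons]
    by_cases h1 : c == a
    · have : (c == b) = false := by
        rw [beq_iff_eq] at h1; subst h1; exact hab
      simp [h1, this, ih]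
    · by_cases h2 : c == b
      · simp [h1, h2, ih]; omega
      · simp [h1, h2, ih]

theorem pvCollect_pairs (a b : Char) (hab : (a == b) = false) (cs : List Char) (k : Int)
    (la lb : List Int) (hla : ∀ x ∈ la, x < k) (hlb : ∀ x ∈ lb, x < k) :
    pvPairs (pvCollect a b cs k (la, lb)).1 (pvCollect a b cs k (la, lb)).2
      = pvPairs la lb + (la.length : Int) * (cs.count b : Int) + pvP a b cs := by
  induction cs generalizing k la lb with
  | nil => simp [pvCollect, pvP]
  | cons c cs ih =>
    simp only [pvCollect, pvP, List.count_cons]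
    by_cases h1 : (c == a) = true
    · have h2 : (c == b) = false := by
        rw [beq_iff_eq] at h1; subst h1; exact hab
      simp only [h1, h2, if_true, Bool.false_eq_true, if_false]
      rw [ih (k + 1) (la ++ [k]) lb
          (by intro x hx; rcases List.mem_append.1 hx with h | h
              · exact lt_trans (hla x h) (by omega)
              · simp at h; omega)
          (by intro x hx; exact lt_trans (hlb x hx) (by omega))]
      rw [pvPairs_append_left]
      have h0 : lb.countP (fun j => decide (k < j)) = 0 :=
        List.countP_eq_zero.2 (by intro x hx; simpa using not_lt.2 (le_of_lt (hlb x hx)))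
      simp [h0]; ring
    · have h1' : (c == a) = false := by simpa using h1
      by_cases h2 : (c == b) = true
      · simp only [h1', h2, Bool.false_eq_true, if_false, if_true]
        rw [ih (k + 1) la (lb ++ [k])
            (by intro x hx; exact lt_trans (hla x hx) (by omega))
            (by intro x hx; rcases List.mem_append.1 hx with h | h
                · exact lt_trans (hlb x h) (by omega)
                · simp at h; omega)]
        rw [pvPairs_append_right]
        have hall : la.countP (fun i => decide (i < k)) = la.length :=
          List.countP_eq_length.2 (by intro x hx; simpa using hla x hx)
        simp [hall]; ring
      · have h2' : (c == b) = false := by simpa using h2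
        simp only [h1', h2', Bool.false_eq_true, if_false]
        rw [ih (k + 1) la lb
            (by intro x hx; exact lt_trans (hla x hx) (by omega))
            (by intro x hx; exact lt_trans (hlb x hx) (by omega))]
        simp

-- A's second loop computes pvPairs
theorem foldl_res_eq_pairs (la lb : List Int) (r0 : Int) :
    la.foldl (fun r i => r + ((lb.length : Int) - pvBisect lb i)) r0
      = r0 + pvPairs la lb := by
  induction la generalizing r0 with
  | nil => simp [pvPairs]
  | cons i la ih =>
    simp only [List.foldl_cons, pvPairs, ih]
    have hsplit : lb.length = lb.countP (fun y => decide (y ≤ i))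
        + lb.countP (fun j => decide (i < j)) := by
      have := List.length_eq_countP_add_countP (p := fun y => decide (y ≤ i)) (l := lb)
      simpa [decide_not, not_le] using this
    simp only [pvBisect]
    omega

-- B's fold in closed form
theorem foldl_B (a b : Char) (cs : List Char) (ca cb res : Int) :
    cs.foldl
      (fun (s : Int × Int × Int) c =>
        let s := if c == b then (s.1, s.2.1 + 1, s.2.2 + s.1) else s
        if c == a then (s.1 + 1, s.2) else s)
      (ca, cb, res)
    = (ca + cs.count a, cb + cs.count b, res + pvP a b cs + ca * cs.count b) := by
  induction cs generalizing ca cb res with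
  | nil => simp [pvP]
  | cons c cs ih =>
    simp only [List.foldl_cons, pvP, List.count_cons]
    by_cases h2 : c == b
    · by_cases h1 : c == a
      · simp only [h1, h2, if_true, ih]
        refine Prod.ext (by push_cast; ring) (Prod.ext (by push_cast; ring) ?_)
        simp; push_cast; ring
      · simp only [h1, h2, if_true, if_false, ih]
        refine Prod.ext (by push_cast; ring) (Prod.ext (by push_cast; ring) ?_)
        simp; push_cast; ring
    · by_cases h1 : c == a
      · simp only [h1, h2, if_true, if_false, ih]
        refine Prod.ext (by push_cast; ring) (Prod.ext (by push_cast; ring) ?_)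
        simp [h1]; push_cast; ring
      · simp only [h1, h2, if_false, ih]
        refine Prod.ext (by push_cast; ring) (Prod.ext (by push_cast; ring) ?_)
        simp [h1]

theorem pvP_self (a : Char) (cs : List Char) :
    2 * pvP a a cs = (cs.count a : Int) * ((cs.count a : Int) - 1) := by
  induction cs with
  | nil => simp [pvP]
  | cons c cs ih =>
    simp only [pvP, List.count_cons]
    by_cases h : c == a
    · simp only [h, if_true]; push_cast; linear_combination ih
    · simp only [h, if_false]; push_cast; linear_combination ih

-- ===== VERDICT (by name: the statement is the Claim_ definition above) =====
theorem maximumSubsequenceCount_spec : Claim_equal_maximumSubsequenceCount := by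
  intro t p _ hPre
  unfold Spec_maximumSubsequenceCount
  unfold Pre_maximumSubsequenceCount at hPre
  obtain ⟨hPre, -⟩ := hPre
  match hp : p.toList with
  | [] => rw [hp] at hPre; simp at hPre
  | [a] => rw [hp] at hPre; simp at hPre
  | a :: b :: rest =>
    have hnn : (0:Int) ≤ (rest.length : Int) + 1 := by positivity
    have ha : PySem.Str.pyGet? p 0 = some a := by
      simp [PySem.Str.pyGet?, PySem.List.pyGet?, PySem.List.pyIdx?, hp, hnn]
    have hb : PySem.Str.pyGet? p 1 = some b := by
      simp [PySem.Str.pyGet?, PySem.List.pyGet?, PySem.List.pyIdx?, hp, hnn]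
    simp only [maximumSubsequenceCount, maximumSubsequenceCount_alt, hp, ha, hb]
    rw [foldl_B]
    by_cases hab : a == b
    · have hEq : a = b := beq_iff_eq.1 hab
      subst hEq
      simp only [hab, if_true]
      have hlen := pvCollect_fst_length a a t.toList 0 ([], [])
      simp only [List.length_nil, Nat.zero_add] at hlen
      rw [hlen]
      have h2 := pvP_self a t.toList
      by_cases h0 : t.toList.count a = 0
      · simp only [h0, if_true]
        simp [h0] at h2 ⊢
        omega
      · simp only [h0, if_false]
        rw [PySem.Int.floordiv_eq_ediv_of_pos (by norm_num), ← h2]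
        push_cast
        omega
    · simp only [hab, if_false]
      have hfst := pvCollect_fst_length a b t.toList 0 ([], [])
      have hsnd := pvCollect_snd_length a b (by simpa using hab) t.toList 0 ([], [])
      simp only [List.length_nil, Nat.zero_add] at hfst hsnd
      rw [foldl_res_eq_pairs]
      have hpairs := pvCollect_pairs a b (by simpa using hab) t.toList 0 [] []
        (by intro x hx; simp at hx) (by intro x hx; simp at hx)
      simp only [pvPairs, List.length_nil] at hpairs
      rw [hfst, hsnd, hpairs]
      push_cast
      ring

set_option maxRecDepth 8192 in
@[simp]
theorem maximumSubsequenceCount_raises : Claim_raises_maximumSubsequenceCount := by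
  unfold Claim_raises_maximumSubsequenceCount
  refine ⟨?_, by decide, ?_, by decide⟩
  case _ =>
    intro t p _ hR hPre
    obtain ⟨hl, hne, hin⟩ := hR
    obtain ⟨-, hor⟩ := hPre
    match hp : p.toList with
    | [] => rw [hp] at hl; simp at hl
    | [a] => rw [hp] at hl; simp at hl
    | a :: b :: rest =>
      rw [hp] at hne hin hor
      rcases hor with h | h
      · exact hne h
      · exact h a (by simp) (hin a (by simp))
  case _ =>
    show Raises_maximumSubsequenceCount "ab" "ab"
    unfold Raises_maximumSubsequenceCount
    exact ⟨by simp, by simp, by simp⟩
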